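-- pv_equiv track=rewrite | github.com/MohammedBoure/CipherSafe | HandlingFiles.py | GetModelFromList
-- ===== SOURCE A (Python) =====
-- def GetModelFromList(listdata, var):
--     listmodels = [[i[0], 0] for i in listdata]
--
--     for char in var.lower():
--         for model in listmodels:
--             if char in model[0].lower():
--                 model[1] += 1
--
--     chosen_model = max(listmodels, key=lambda x: x[1], default=None)
--
--     if chosen_model:
--         for item in listdata:
--             if item[0] == chosen_model[0]:
--                 return item
--
--     return None
-- ===== SOURCE B (Python) =====
-- def GetModelFromList(listdata, var):
--     counts = {}
--     for c in var.lower():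
--         counts[c] = counts.get(c, 0) + 1
--     best = None  # (score, name), first maximum kept
--     for item in listdata:
--         name = item[0]
--         score = sum(counts.get(c, 0) for c in set(name.lower()))
--         if best is None or score > best[0]:
--             best = (score, name)
--     if best is None:
--         return None
--     for item in listdata:
--         if item[0] == best[1]:
--             return item
--     return None
-- ===== Notes on version B (the rewrite author's own statement) =====
-- stated objective: faster
-- what changed: B replaces A's nested scan (for every character of var, rescan and update every model's counter) by a character-frequency table of var built once plus a single pass over the models, scoring each model as the sum of the table's counts over the model name's distinct characters, with a running first-max instead of a global max over a score list.
import Mathlib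
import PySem

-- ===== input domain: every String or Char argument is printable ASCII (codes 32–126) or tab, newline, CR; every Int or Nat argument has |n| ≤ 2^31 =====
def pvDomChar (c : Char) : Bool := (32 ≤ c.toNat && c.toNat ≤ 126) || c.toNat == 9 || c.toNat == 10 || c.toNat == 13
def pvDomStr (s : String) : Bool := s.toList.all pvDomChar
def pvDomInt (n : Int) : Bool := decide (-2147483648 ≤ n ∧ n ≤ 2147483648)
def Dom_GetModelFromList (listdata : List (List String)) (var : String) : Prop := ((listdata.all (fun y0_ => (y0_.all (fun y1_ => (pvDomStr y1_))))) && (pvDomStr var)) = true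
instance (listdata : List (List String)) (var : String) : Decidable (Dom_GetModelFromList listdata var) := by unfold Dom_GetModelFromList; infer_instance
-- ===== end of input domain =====

-- B rebuilds the scoring: a character-frequency table of `var` built once, then each model
-- scored over its own distinct characters in a single pass over the models (objective: faster; measured).


-- ===== PORT A =====
-- `char in model[0].lower()`: `char` is a single character of var.lower(), so the substring
-- test is exactly character membership (exact on single-character needles).
def GetModelFromList (listdata : List (List String)) (var : String) : Option (List String) :=
  let listmodels : List (String × Int) :=
    listdata.map (fun i => ((PySem.List.pyGet? i (0:Int)).getD "", (0:Int)))
  let listmodels :=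
    (PySem.Chars.lower var.toList).foldl
      (fun lm char =>
        lm.map (fun model =>
          if (PySem.Chars.lower model.1.toList).contains char then (model.1, model.2 + 1) else model))
      listmodels
  match PySem.List.max? listmodels (fun x => x.2) with
  | none => none
  | some chosen =>
      listdata.find? (fun item => ((PySem.List.pyGet? item (0:Int)).getD "") == chosen.1)

-- ===== PORT B =====
def GetModelFromList_alt (listdata : List (List String)) (var : String) : Option (List String) :=
  let counts : PySem.Dict Char Int :=
    (PySem.Chars.lower var.toList).foldl (fun d c => d.insert c (d.getD c 0 + 1)) PySem.Dict.empty
  let best : Option (Int × String) :=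
    listdata.foldl
      (fun best item =>
        let name := (PySem.List.pyGet? item (0:Int)).getD ""
        let score := ((PySem.Set.ofList (PySem.Chars.lower name.toList)).map
                        (fun c => counts.getD c 0)).sum
        match best with
        | none => some (score, name)
        | some b => if b.1 < score then some (score, name) else some b)
      none
  match best with
  | none => none
  | some b => listdata.find? (fun item => ((PySem.List.pyGet? item (0:Int)).getD "") == b.2)

-- ===== PRECONDITION & SPEC =====
-- Pre_ excludes only inputs where BOTH programs raise IndexError: an empty inner list (item[0]).
def Pre_GetModelFromList (listdata : List (List String)) (var : String) : Prop :=
  ∀ item ∈ listdata, item ≠ []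
instance (listdata : List (List String)) (var : String) : Decidable (Pre_GetModelFromList listdata var) := by unfold Pre_GetModelFromList; infer_instance
def pvWitness_GetModelFromList : List (List String) × String := ([["gpt", "x"], ["bard"]], "part")

def Spec_GetModelFromList (listdata : List (List String)) (var : String) (out : Option (List String)) : Prop := out = GetModelFromList_alt listdata var
instance (listdata : List (List String)) (var : String) (out : Option (List String)) : Decidable (Spec_GetModelFromList listdata var out) := by unfold Spec_GetModelFromList; infer_instance

-- ===== CLAIM (what is proved, stated in full; the proofs are below) =====
def Claim_equal_GetModelFromList : Prop := ∀ (listdata : List (List String)) (var : String), Dom_GetModelFromList listdata var → Pre_GetModelFromList listdata var → Spec_GetModelFromList listdata var (GetModelFromList listdata var)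

-- ===== LEMMAS AND PROOFS =====

-- A's nested loop: after folding all chars, each model carries its independent score.
theorem charFold_eq_map (chars : List Char) (lm : List (String × Int)) :
    chars.foldl
      (fun lm char =>
        lm.map (fun model =>
          if (PySem.Chars.lower model.1.toList).contains char then (model.1, model.2 + 1) else model))
      lm
    = lm.map (fun m => (m.1, m.2 + (chars.countP (fun ch => (PySem.Chars.lower m.1.toList).contains ch) : Int))) := by
  induction chars generalizing lm with
  | nil => simp
  | cons a t ih =>
      simp only [List.foldl_cons, ih, List.map_map, List.countP_cons]
      apply List.map_congr_left
      intro m _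
      simp only [Function.comp_apply]
      by_cases h : (PySem.Chars.lower m.1.toList).contains a
      · rw [if_pos h, if_pos h]
        simp only [Prod.mk.injEq]
        refine ⟨trivial, ?_⟩
        push_cast
        ring
      · rw [if_neg h, if_neg h]
        simp only [Prod.mk.injEq]
        refine ⟨trivial, ?_⟩
        push_cast
        ring

-- sum of the indicator of a over a duplicate-free list
theorem sum_map_indicator (S : List Char) (hS : S.Nodup) (a : Char) :
    (S.map (fun c => ((if a == c then 1 else 0 : Nat) : Int))).sum
      = if S.contains a then (1:Int) else 0 := by
  induction S with
  | nil => simp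
  | cons s ss ih =>
      obtain ⟨hs, hnd⟩ := List.nodup_cons.mp hS
      simp only [List.map_cons, List.sum_cons, ih hnd, List.contains_cons]
      by_cases h : a = s
      · subst h
        simp [hs]
      · simp [beq_iff_eq, h]

-- distinct-character sum of counts = countP over the whole list (B's score = A's score)
theorem sum_map_count_eq_countP (S : List Char) (hS : S.Nodup) (l : List Char) :
    (S.map (fun c => (l.count c : Int))).sum = (l.countP (fun ch => S.contains ch) : Int) := by
  induction l with
  | nil => simp
  | cons a t ih =>
      calc (S.map (fun c => ((a :: t).count c : Int))).sum
          = (S.map (fun c => (t.count c : Int) + ((if a == c then 1 else 0 : Nat) : Int))).sum := by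
            apply congrArg
            apply List.map_congr_left
            intro c _
            rw [List.count_cons]
            push_cast
            ring
        _ = (S.map (fun c => (t.count c : Int))).sum
              + (S.map (fun c => ((if a == c then 1 else 0 : Nat) : Int))).sum := by
            rw [← List.sum_map_add]
        _ = (t.countP (fun ch => S.contains ch) : Int) + (if S.contains a then (1:Int) else 0) := by
            rw [ih, sum_map_indicator S hS a]
        _ = ((a :: t).countP (fun ch => S.contains ch) : Int) := by
            simp only [List.countP_cons]
            push_cast
            by_cases h : S.contains a <;> simp [h]

-- max? over swapped pairs
theorem max?_swap (l : List (String × Int)) :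
    PySem.List.max? (l.map Prod.swap) (fun x => x.1)
      = Option.map Prod.swap (PySem.List.max? l (fun x => x.2)) := by
  unfold PySem.List.max?
  rw [List.foldl_map]
  show List.foldl _ (Option.map Prod.swap none) l = _
  refine List.foldl_hom _ ?_
  intro x y
  cases x with
  | none => rfl
  | some m =>
      by_cases h : m.2 < y.2
      · simp [Prod.swap, h]
      · simp [Prod.swap, h]

-- B's running best IS max? over the swapped score list
theorem foldl_best_eq_max? (l : List (Int × String)) :
    l.foldl (fun best x => match best with
      | none => some x
      | some b => if b.1 < x.1 then some x else some b) none
    = PySem.List.max? l (fun x => x.1) := by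
  unfold PySem.List.max?
  refine PySem.List.foldl_congr_mem _ _ _ _ ?_
  intro acc x _
  cases acc <;> rfl

-- B's score of a name = A's per-model count over var's characters
theorem score_eq (vl : List Char) (name : String) :
    ((PySem.Set.ofList (PySem.Chars.lower name.toList)).map
        (fun c => ((vl.foldl (fun d c => d.insert c (d.getD c 0 + 1)) PySem.Dict.empty).getD c 0))).sum
    = (vl.countP (fun ch => (PySem.Chars.lower name.toList).contains ch) : Int) := by
  have h1 : ((PySem.Set.ofList (PySem.Chars.lower name.toList)).map
        (fun c => ((vl.foldl (fun d c => d.insert c (d.getD c 0 + 1)) PySem.Dict.empty).getD c 0))).sum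
      = ((PySem.Set.ofList (PySem.Chars.lower name.toList)).map (fun c => (vl.count c : Int))).sum := by
    apply congrArg
    apply List.map_congr_left
    intro c _
    rw [PySem.Dict.getD_foldl_insert_add_one]
    simp
  rw [h1, sum_map_count_eq_countP _ (PySem.Set.nodup_ofList _) vl]
  apply congrArg
  apply List.countP_congr
  intro ch _
  constructor
  · intro h
    simpa [PySem.Set.mem_ofList] using h
  · intro h
    simpa [PySem.Set.mem_ofList] using h

-- B's accumulator loop over listdata is max? over the (score, name) list
theorem foldB_eq (counts : PySem.Dict Char Int) (l : List (List String)) :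
    l.foldl (fun best item =>
      let name := (PySem.List.pyGet? item (0:Int)).getD ""
      let score := ((PySem.Set.ofList (PySem.Chars.lower name.toList)).map
                      (fun c => counts.getD c 0)).sum
      match best with
      | none => some (score, name)
      | some b => if b.1 < score then some (score, name) else some b) none
    = PySem.List.max?
        (l.map (fun item =>
          (((PySem.Set.ofList (PySem.Chars.lower ((PySem.List.pyGet? item (0:Int)).getD "").toList)).map
              (fun c => counts.getD c 0)).sum,
            (PySem.List.pyGet? item (0:Int)).getD "")))
        (fun x => x.1) := by
  rw [← foldl_best_eq_max?]
  rw [List.foldl_map]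

-- ===== VERDICT (by name: the statement is the Claim_ definition above) =====
theorem GetModelFromList_spec : Claim_equal_GetModelFromList := by
  intro listdata var _hdom _hpre
  unfold Spec_GetModelFromList GetModelFromList GetModelFromList_alt
  simp only
  rw [charFold_eq_map, List.map_map, foldB_eq]
  have hmap :
      listdata.map (fun item =>
          (((PySem.Set.ofList (PySem.Chars.lower ((PySem.List.pyGet? item (0:Int)).getD "").toList)).map
              (fun c => ((PySem.Chars.lower var.toList).foldl
                  (fun d c => d.insert c (d.getD c 0 + 1)) PySem.Dict.empty).getD c 0)).sum,
            (PySem.List.pyGet? item (0:Int)).getD ""))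
      = (listdata.map
          ((fun m => (m.1, m.2 + ((PySem.Chars.lower var.toList).countP
              (fun ch => (PySem.Chars.lower m.1.toList).contains ch) : Int)))
            ∘ (fun i => ((PySem.List.pyGet? i (0:Int)).getD "", (0:Int))))).map Prod.swap := by
    rw [List.map_map]
    apply List.map_congr_left
    intro item _
    simp only [Function.comp_apply, Prod.swap]
    rw [score_eq]
    simp
  rw [hmap, max?_swap]
  cases PySem.List.max?
      (listdata.map
        ((fun m => (m.1, m.2 + ((PySem.Chars.lower var.toList).countP
            (fun ch => (PySem.Chars.lower m.1.toList).contains ch) : Int)))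
          ∘ (fun i => ((PySem.List.pyGet? i (0:Int)).getD "", (0:Int)))))
      (fun x => x.2) with
  | none => rfl
  | some c => cases c <;> rfl
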